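-- pv_equiv track=rewrite | github.com/KocWozniakPiotr/yamiru | scripts/backup.py | clean_secret
-- ===== SOURCE A (Python) =====
-- def clean_secret(_key):
--     end_of_string = 0
--     temp = ''
--     for e in _key:
--         temp += e
--         if e == "'":
--             end_of_string += 1
--         if end_of_string == 2:
--             break
--     return temp
-- ===== SOURCE B (Python) =====
-- def clean_secret(_key):
--     head, sep, tail = _key.partition("'")
--     if not sep:
--         return _key
--     mid, sep2, _ = tail.partition("'")
--     if not sep2:
--         return _key
--     return head + "'" + mid + "'"
-- ===== Notes on version B (the rewrite author's own statement) =====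
-- stated objective: idiomatic
-- what changed: Replaces the character-by-character accumulation loop with a quote counter by two str.partition calls that split the string at the first and second quote and reassemble the prefix.
import Mathlib
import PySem

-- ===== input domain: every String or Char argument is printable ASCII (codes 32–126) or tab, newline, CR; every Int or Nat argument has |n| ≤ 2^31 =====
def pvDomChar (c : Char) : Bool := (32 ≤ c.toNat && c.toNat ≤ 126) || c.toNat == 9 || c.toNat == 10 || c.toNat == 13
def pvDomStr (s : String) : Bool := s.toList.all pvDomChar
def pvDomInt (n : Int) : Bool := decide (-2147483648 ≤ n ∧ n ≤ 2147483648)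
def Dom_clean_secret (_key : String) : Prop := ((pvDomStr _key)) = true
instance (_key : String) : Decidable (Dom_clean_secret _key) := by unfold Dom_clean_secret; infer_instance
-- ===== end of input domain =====

-- B replaces A's char-by-char accumulation loop with two str.partition splits (idiomatic, same cost).

-- ===== PORT A =====
-- the for-loop with 'break': structural recursion over the chars with the counter and accumulator as state
def cleanLoopA : List Char → Int → List Char → List Char
  | [], _, temp => temp
  | e :: rest, cnt, temp =>
    let temp' := temp ++ [e]
    let cnt' := if e = '\'' then cnt + 1 else cnt
    if cnt' = 2 then temp' else cleanLoopA rest cnt' temp'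

def clean_secret (_key : String) : String :=
  String.ofList (cleanLoopA _key.toList 0 [])

-- ===== PORT B =====
-- hand port of str.partition(sep) for the one-char separator "'": exact —
-- (chars before the first quote, ["'"] if a quote occurs else [], chars after it)
def partQuote : List Char → List Char × List Char × List Char
  | [] => ([], [], [])
  | c :: cs =>
    if c = '\'' then ([], ['\''], cs)
    else
      let (h, s, t) := partQuote cs
      (c :: h, s, t)

def clean_secret_alt (_key : String) : String :=
  let (head, sep, tail) := partQuote _key.toList
  if sep = [] then _key
  else
    let (mid, sep2, _) := partQuote tail
    if sep2 = [] then _key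
    else String.ofList (head ++ ['\''] ++ mid ++ ['\''])

-- ===== PRECONDITION & SPEC =====
def Spec_clean_secret (_key : String) (out : String) : Prop := out = clean_secret_alt _key
instance (_key : String) (out : String) : Decidable (Spec_clean_secret _key out) := by unfold Spec_clean_secret; infer_instance

-- ===== CLAIM (what is proved, stated in full; the proofs are below) =====
def Claim_equal_clean_secret : Prop := ∀ (_key : String), Dom_clean_secret _key → Spec_clean_secret _key (clean_secret _key)

-- ===== LEMMAS AND PROOFS =====

-- if a quote occurs, partition reassembles the input
theorem partQuote_append (cs : List Char) (h : (partQuote cs).2.1 ≠ []) :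
    cs = (partQuote cs).1 ++ ['\''] ++ (partQuote cs).2.2 := by
  induction cs with
  | nil => simp [partQuote] at h
  | cons c cs ih =>
    by_cases hc : c = '\''
    · simp [partQuote, hc]
    · simp only [partQuote, if_neg hc] at h ⊢
      simpa using ih h

-- A's loop after the first quote: stops at the next quote, else consumes everything
theorem cleanLoopA_one (cs : List Char) (acc : List Char) :
    cleanLoopA cs 1 acc =
      if (partQuote cs).2.1 = [] then acc ++ cs
      else acc ++ (partQuote cs).1 ++ ['\''] := by
  induction cs generalizing acc with
  | nil => simp [cleanLoopA, partQuote]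
  | cons c cs ih =>
    by_cases hc : c = '\''
    · simp [cleanLoopA, partQuote, hc]
    · simp only [cleanLoopA, partQuote, if_neg hc]
      norm_num
      rw [ih]
      by_cases hs : (partQuote cs).2.1 = [] <;> simp [hs]

-- A's loop before any quote: runs to the first quote then continues with counter 1
theorem cleanLoopA_zero (cs : List Char) (acc : List Char) :
    cleanLoopA cs 0 acc =
      if (partQuote cs).2.1 = [] then acc ++ cs
      else cleanLoopA (partQuote cs).2.2 1 (acc ++ (partQuote cs).1 ++ ['\'']) := by
  induction cs generalizing acc with
  | nil => simp [cleanLoopA, partQuote]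
  | cons c cs ih =>
    by_cases hc : c = '\''
    · simp [cleanLoopA, partQuote, hc]
    · simp only [cleanLoopA, partQuote, if_neg hc]
      norm_num
      rw [ih]
      by_cases hs : (partQuote cs).2.1 = [] <;> simp [hs]

-- ===== VERDICT (by name: the statement is the Claim_ definition above) =====
theorem clean_secret_spec : Claim_equal_clean_secret := by
  intro k _
  unfold Spec_clean_secret clean_secret clean_secret_alt
  rw [cleanLoopA_zero]
  by_cases h1 : (partQuote k.toList).2.1 = []
  · simp [h1, String.ofList_toList]
  · simp only [if_neg h1]
    rw [cleanLoopA_one]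
    by_cases h2 : (partQuote (partQuote k.toList).2.2).2.1 = []
    · have := partQuote_append k.toList h1
      simp [h2]
      conv_rhs => rw [← String.ofList_toList (s := k), this]
      simp
    · simp [h2]
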